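-- pv_equiv track=rewrite | github.com/hrudaym6-hue/n8n-tryout | extract_business_rules.py | extract_procedure_division
-- ===== SOURCE A (Python) =====
-- def extract_procedure_division(content: str) -> tuple:
--     lines = content.split('\n')
--     proc_start = -1
--
--     for i, line in enumerate(lines):
--         if 'PROCEDURE DIVISION' in line.upper():
--             proc_start = i
--             break
--
--     if proc_start == -1:
--         return [], 0
--
--     return lines[proc_start:], proc_start
-- ===== SOURCE B (Python) =====
-- def extract_procedure_division(content: str) -> tuple:
--     pos = content.upper().find('PROCEDURE DIVISION')
--     if pos == -1:
--         return [], 0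
--     start = content[:pos].count('\n')
--     return content.split('\n')[start:], start
-- ===== Notes on version B (the rewrite author's own statement) =====
-- stated objective: idiomatic
-- what changed: Replaces the explicit enumerate-lines-and-break scan (uppercasing each line) by a single whole-string find on content.upper() plus a newline count over the prefix before the match to recover the line index.
import Mathlib
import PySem

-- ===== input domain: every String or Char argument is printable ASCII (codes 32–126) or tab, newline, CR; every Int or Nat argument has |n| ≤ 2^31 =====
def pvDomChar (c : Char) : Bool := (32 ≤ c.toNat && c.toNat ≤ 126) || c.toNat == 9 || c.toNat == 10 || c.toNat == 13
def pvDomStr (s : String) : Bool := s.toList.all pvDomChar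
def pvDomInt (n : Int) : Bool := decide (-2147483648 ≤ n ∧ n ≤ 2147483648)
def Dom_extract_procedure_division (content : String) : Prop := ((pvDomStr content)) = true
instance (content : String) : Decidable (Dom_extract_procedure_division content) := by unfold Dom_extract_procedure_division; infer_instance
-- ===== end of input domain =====

-- B replaces A's explicit enumerate-lines-and-break scan by one whole-string search on the
-- uppercased content plus a newline count over the prefix before the match (objective: idiomatic).

-- ===== PORT A =====
-- the "for i, line in enumerate(lines): if 'PROCEDURE DIVISION' in line.upper(): …; break" loop
def pvScanA : List String → Int → Int
  | [], _ => -1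
  | l :: ls, i =>
    if PySem.Str.isIn "PROCEDURE DIVISION" (PySem.Str.upper l) then i else pvScanA ls (i + 1)

def extract_procedure_division (content : String) : List String × Int :=
  let lines := (PySem.Str.split? content "\n").getD []   -- sep "\n" is nonempty: split? is always some
  let proc_start := pvScanA lines 0
  if proc_start = -1 then ([], 0)
  else (PySem.List.slice lines (some proc_start) none, proc_start)

-- ===== PORT B =====
def extract_procedure_division_alt (content : String) : List String × Int :=
  let pos := PySem.Str.find (PySem.Str.upper content) "PROCEDURE DIVISION"
  if pos = -1 then ([], 0)
  else
    let start : Int := (PySem.Str.count (PySem.Str.slice content none (some pos)) "\n" : Int)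
    let lines := (PySem.Str.split? content "\n").getD []
    (PySem.List.slice lines (some start) none, start)

-- ===== PRECONDITION & SPEC =====
def Spec_extract_procedure_division (content : String) (out : List String × Int) : Prop := out = extract_procedure_division_alt content
instance (content : String) (out : List String × Int) : Decidable (Spec_extract_procedure_division content out) := by unfold Spec_extract_procedure_division; infer_instance

-- ===== CLAIM (what is proved, stated in full; the proofs are below) =====
def Claim_equal_extract_procedure_division : Prop := ∀ (content : String), Dom_extract_procedure_division content → Spec_extract_procedure_division content (extract_procedure_division content)

-- ===== LEMMAS AND PROOFS =====


def pvSplit : List Char → List (List Char)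
  | [] => [[]]
  | c :: t => if c = '\n' then [] :: pvSplit t else (pvSplit t).modifyHead (c :: ·)

theorem pvSplit_ne_nil (cs : List Char) : pvSplit cs ≠ [] := by
  cases cs with
  | nil => simp [pvSplit]
  | cons c t =>
    simp only [pvSplit]
    split
    · simp
    · cases h : pvSplit t with
      | nil => exact absurd h (pvSplit_ne_nil t)
      | cons p ps => simp

theorem pvSplit_go (cs : List Char) : ∀ (fuel : Nat) (cur : List Char) (acc : List (List Char)),
    cs.length < fuel →
    PySem.Chars.splitOn.go ['\n'] fuel cs cur acc
      = acc.reverse ++ (pvSplit cs).modifyHead (cur.reverse ++ ·) := by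
  induction cs with
  | nil =>
    intro fuel cur acc h
    cases fuel with
    | zero => omega
    | succ f => simp [PySem.Chars.splitOn.go, pvSplit]
  | cons c t ih =>
    intro fuel cur acc h
    cases fuel with
    | zero => omega
    | succ f =>
      rw [PySem.Chars.splitOn.go]
      simp only [List.length_cons] at h
      by_cases hc : c = '\n'
      · subst hc
        have hp : List.isPrefixOf ['\n'] ('\n' :: t) = true := by
          simp [List.isPrefixOf]
        rw [if_pos hp]
        show PySem.Chars.splitOn.go ['\n'] f (List.drop 1 ('\n' :: t)) [] (cur.reverse :: acc) = _
        rw [show List.drop 1 ('\n' :: t) = t from rfl, ih f [] (cur.reverse :: acc) (by omega)]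
        cases hps : pvSplit t with
        | nil => exact absurd hps (pvSplit_ne_nil t)
        | cons p ps => simp [pvSplit, hps]
      · have hp : List.isPrefixOf ['\n'] (c :: t) = false := by
          simp [List.isPrefixOf]
          exact fun h' => absurd h'.symm hc
        rw [if_neg (by simp [hp])]
        rw [ih f (c :: cur) acc (by omega)]
        cases hps : pvSplit t with
        | nil => exact absurd hps (pvSplit_ne_nil t)
        | cons p ps => simp [pvSplit, hc, hps]

theorem splitOn_eq_pvSplit (cs : List Char) : PySem.Chars.splitOn cs ['\n'] = pvSplit cs := by
  rw [PySem.Chars.splitOn, pvSplit_go cs (cs.length + 1) [] [] (by omega)]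
  cases hps : pvSplit cs with
  | nil => exact absurd hps (pvSplit_ne_nil cs)
  | cons p ps => simp

theorem pvSplit_join (cs : List Char) : PySem.Chars.join ['\n'] (pvSplit cs) = cs := by
  induction cs with
  | nil => simp [pvSplit, PySem.Chars.join_singleton]
  | cons c t ih =>
    cases hps : pvSplit t with
    | nil => exact absurd hps (pvSplit_ne_nil t)
    | cons p ps =>
      by_cases hc : c = '\n'
      · subst hc
        simp only [pvSplit, hps, reduceIte]
        rw [PySem.Chars.join_cons_cons]
        rw [hps] at ih
        simp [ih]
      · simp only [pvSplit, if_neg hc, hps, List.modifyHead_cons]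
        rw [hps] at ih
        cases ps with
        | nil =>
          rw [PySem.Chars.join_singleton] at ih ⊢
          simp [ih]
        | cons q qs =>
          rw [PySem.Chars.join_cons_cons] at ih ⊢
          simp [ih]

theorem pvSplit_no_nl (cs : List Char) : ∀ p ∈ pvSplit cs, '\n' ∉ p := by
  induction cs with
  | nil => simp [pvSplit]
  | cons c t ih =>
    by_cases hc : c = '\n'
    · subst hc
      simp only [pvSplit, reduceIte]
      intro p hp
      rcases List.mem_cons.mp hp with h | h
      · simp [h]
      · exact ih p h
    · simp only [pvSplit, if_neg hc]
      cases hps : pvSplit t with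
      | nil => exact absurd hps (pvSplit_ne_nil t)
      | cons q qs =>
        intro p hp
        rcases List.mem_cons.mp hp with h | h
        · subst h
          intro hmem
          rcases List.mem_cons.mp hmem with h' | h'
          · exact hc h'.symm
          · exact ih q (by simp [hps]) h'
        · exact ih p (by simp [hps, h])


theorem count_go_single (l : List Char) : ∀ (fuel acc : Nat), l.length ≤ fuel →
    PySem.Chars.count.go ['\n'] fuel l acc = acc + l.count '\n' := by
  induction l with
  | nil =>
    intro fuel acc h
    cases fuel with
    | zero => simp [PySem.Chars.count.go]
    | succ f => simp [PySem.Chars.count.go]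
  | cons c t ih =>
    intro fuel acc h
    cases fuel with
    | zero => simp at h
    | succ f =>
      rw [PySem.Chars.count.go]
      simp only [List.length_cons] at h
      by_cases hc : c = '\n'
      · subst hc
        have hp : List.isPrefixOf ['\n'] ('\n' :: t) = true := by simp [List.isPrefixOf]
        rw [if_pos hp]
        rw [show List.drop ['\n'].length ('\n' :: t) = t from rfl]
        rw [ih f (acc + 1) (by omega)]
        simp
        omega
      · have hp : List.isPrefixOf ['\n'] (c :: t) = false := by
          simp [List.isPrefixOf]
          exact fun h' => absurd h'.symm hc
        rw [if_neg (by simp [hp])]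
        rw [ih f acc (by omega)]
        simp [hc]

theorem chars_count_nl (l : List Char) : PySem.Chars.count l ['\n'] = l.count '\n' := by
  rw [PySem.Chars.count]
  simp only [List.isEmpty_cons, Bool.false_eq_true, if_false]
  rw [count_go_single l l.length 0 le_rfl]
  exact Nat.zero_add _

theorem upperChar_nl_iff (c : Char) : PySem.Chars.upperChar c = '\n' ↔ c = '\n' := by
  rw [PySem.Chars.upperChar, PySem.Chars.islower]
  split
  · rename_i h
    simp only [decide_eq_true_eq, Bool.and_eq_true] at h
    have h1 : (97 : Nat) ≤ c.toNat := h.1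
    have h2 : c.toNat ≤ (122 : Nat) := h.2
    constructor
    · intro he
      exfalso
      have hv : (c.toNat - 32).isValidChar := Or.inl (by omega)
      have ht : (Char.ofNat (c.toNat - 32)).toNat = c.toNat - 32 := by
        rw [Char.toNat_ofNat, if_pos hv]
      rw [he] at ht
      have : ('\n').toNat = 10 := rfl
      omega
    · intro he
      subst he
      revert h1
      decide
  · simp

theorem count_nl_map_upper (l : List Char) :
    (l.map PySem.Chars.upperChar).count '\n' = l.count '\n' := by
  induction l with
  | nil => simp
  | cons c t ih =>
    simp only [List.map_cons, List.count_cons, ih]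
    congr 1
    by_cases hc : c = '\n'
    · simp [hc, (upperChar_nl_iff '\n').mpr rfl]
    · have : PySem.Chars.upperChar c ≠ '\n' := fun h => hc ((upperChar_nl_iff c).mp h)
      simp [hc, this]

theorem map_upper_join (ps : List (List Char)) :
    (PySem.Chars.join ['\n'] ps).map PySem.Chars.upperChar
      = PySem.Chars.join ['\n'] (ps.map (List.map PySem.Chars.upperChar)) := by
  match ps with
  | [] => simp [PySem.Chars.join_nil]
  | [p] => simp [PySem.Chars.join_singleton]
  | p :: q :: rest =>
    rw [PySem.Chars.join_cons_cons, List.map_cons, List.map_cons, PySem.Chars.join_cons_cons]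
    rw [← List.map_cons, ← map_upper_join (q :: rest)]
    simp [PySem.Chars.upperChar, PySem.Chars.islower, Char.le_def]

theorem pv_nospan {M u v : List Char} (hM : '\n' ∉ M) (h : M <+: u ++ '\n' :: v) : M <+: u := by
  by_cases hlen : M.length ≤ u.length
  · have := List.prefix_iff_eq_take.mp h
    rw [List.take_append_of_le_length hlen] at this
    rw [this]
    exact List.take_prefix _ _
  · exfalso
    apply hM
    have heq := List.prefix_iff_eq_take.mp h
    have hlt : u.length < (u ++ '\n' :: v).length := by simp
    have hlt2 : u.length < (List.take M.length (u ++ '\n' :: v)).length := by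
      simp
      omega
    have : (List.take M.length (u ++ '\n' :: v))[u.length] = '\n' := by
      rw [List.getElem_take]
      rw [List.getElem_append_right le_rfl]
      simp
    rw [heq]
    exact List.mem_iff_getElem.mpr ⟨u.length, hlt2, this⟩


theorem find_eq_of (s M : List Char) (j : Nat) (h1 : M <+: s.drop j)
    (h2 : ∀ i < j, ¬ M <+: s.drop i) : PySem.Chars.find s M = (j : Int) := by
  have hisin : PySem.Chars.isIn M s = true := (PySem.Chars.exists_prefix_drop_iff_isIn M s).mp ⟨j, h1⟩
  have hinf : M <:+: s := (PySem.Chars.isIn_iff_infix M s).mp hisin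
  have hpos : 0 ≤ PySem.Chars.find s M := (PySem.Chars.find_nonneg_iff s M).mpr hinf
  obtain ⟨hpre, hmin⟩ := PySem.Chars.find_spec hpos
  have hfe : (PySem.Chars.find s M).toNat = j := by
    rcases lt_trichotomy (PySem.Chars.find s M).toNat j with h | h | h
    · exact absurd hpre (h2 _ h)
    · exact h
    · exact absurd h1 (hmin j h)
  rw [← Int.toNat_of_nonneg hpos, hfe]

theorem drop_lt_of_prefix {M p : List Char} (hM : M ≠ []) {j : Nat} (h : M <+: p.drop j) :
    j < p.length := by
  by_contra hc
  rw [List.drop_eq_nil_of_le (by omega)] at h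
  exact hM (List.prefix_nil.mp h)


theorem pv_main (M : List Char) (hM : M ≠ []) (hMn : '\n' ∉ M) :
    ∀ ps : List (List Char), (∀ p ∈ ps, '\n' ∉ p) →
    (match ps.findIdx? (fun p => PySem.Chars.isIn M p) with
     | none => PySem.Chars.find (PySem.Chars.join ['\n'] ps) M = -1
     | some i => ∃ j : Nat, PySem.Chars.find (PySem.Chars.join ['\n'] ps) M = (j : Int)
          ∧ ((PySem.Chars.join ['\n'] ps).take j).count '\n' = i) := by
  intro ps
  induction ps with
  | nil =>
    intro _
    simp only [List.findIdx?_nil]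
    rw [PySem.Chars.join_nil, PySem.Chars.find_eq_neg_one_iff]
    intro hinf
    exact hM (List.eq_nil_of_infix_nil hinf)
  | cons p rest ih =>
    intro hnl
    have hpn : '\n' ∉ p := hnl p (by simp)
    by_cases hp : PySem.Chars.isIn M p = true
    · simp only [List.findIdx?_cons, hp, if_true]
      have hinf : M <:+: p := (PySem.Chars.isIn_iff_infix M p).mp hp
      have hpos : 0 ≤ PySem.Chars.find p M := (PySem.Chars.find_nonneg_iff p M).mpr hinf
      obtain ⟨hpre, hmin⟩ := PySem.Chars.find_spec hpos
      have hjlt : (PySem.Chars.find p M).toNat < p.length := drop_lt_of_prefix hM hpre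
      cases rest with
      | nil =>
        rw [PySem.Chars.join_singleton]
        refine ⟨(PySem.Chars.find p M).toNat, by rw [Int.toNat_of_nonneg hpos], ?_⟩
        exact List.count_eq_zero.mpr (fun hmem => hpn (List.mem_of_mem_take hmem))
      | cons q t =>
        rw [PySem.Chars.join_cons_cons]
        have hccat : p ++ ['\n'] ++ PySem.Chars.join ['\n'] (q :: t)
            = p ++ '\n' :: PySem.Chars.join ['\n'] (q :: t) := by simp
        rw [hccat]
        refine ⟨(PySem.Chars.find p M).toNat, ?_, ?_⟩
        · apply find_eq_of
          · rw [List.drop_append_of_le_length (by omega)]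
            exact hpre.trans (List.prefix_append _ _)
          · intro i hi hcon
            rw [List.drop_append_of_le_length (by omega)] at hcon
            exact hmin i hi (pv_nospan hMn hcon)
        · rw [List.take_append_of_le_length (by omega)]
          exact List.count_eq_zero.mpr (fun hmem => hpn (List.mem_of_mem_take hmem))
    · simp only [List.findIdx?_cons, hp, if_false, Bool.false_eq_true]
      have ihh := ih (fun r hr => hnl r (List.mem_cons_of_mem _ hr))
      cases hfi : rest.findIdx? (fun r => PySem.Chars.isIn M r) with
      | none =>
        rw [hfi] at ihh
        simp only [Option.map_none]
        cases rest with
        | nil =>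
          rw [PySem.Chars.join_singleton, PySem.Chars.find_eq_neg_one_iff]
          intro hinf
          exact hp ((PySem.Chars.isIn_iff_infix M p).mpr hinf)
        | cons q t =>
          rw [PySem.Chars.join_cons_cons]
          have hccat : p ++ ['\n'] ++ PySem.Chars.join ['\n'] (q :: t)
              = p ++ '\n' :: PySem.Chars.join ['\n'] (q :: t) := by simp
          rw [hccat, PySem.Chars.find_eq_neg_one_iff]
          intro hinf
          obtain ⟨k, hk⟩ := (PySem.Chars.exists_prefix_drop_iff_isIn M _).mpr
            ((PySem.Chars.isIn_iff_infix M _).mpr hinf)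
          by_cases hkp : k ≤ p.length
          · rw [List.drop_append_of_le_length hkp] at hk
            exact hp ((PySem.Chars.exists_prefix_drop_iff_isIn M p).mp ⟨k, pv_nospan hMn hk⟩)
          · obtain ⟨m, hm⟩ : ∃ m, k - p.length = m + 1 := ⟨k - p.length - 1, by omega⟩
            have hd : (p ++ '\n' :: PySem.Chars.join ['\n'] (q :: t)).drop k
                = (PySem.Chars.join ['\n'] (q :: t)).drop m := by
              rw [List.drop_append, List.drop_eq_nil_of_le (by omega), List.nil_append, hm,
                List.drop_succ_cons]
            rw [hd] at hk
            have : PySem.Chars.find (PySem.Chars.join ['\n'] (q :: t)) M ≠ -1 := by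
              rw [PySem.Chars.find_ne_neg_one_iff]
              exact (PySem.Chars.isIn_iff_infix M _).mp
                ((PySem.Chars.exists_prefix_drop_iff_isIn M _).mp ⟨_, hk⟩)
            exact this ihh
      | some i =>
        rw [hfi] at ihh
        obtain ⟨j', hj', hcnt⟩ := ihh
        simp only [Option.map_some]
        cases rest with
        | nil => simp at hfi
        | cons q t =>
          rw [PySem.Chars.join_cons_cons]
          have hccat : p ++ ['\n'] ++ PySem.Chars.join ['\n'] (q :: t)
              = p ++ '\n' :: PySem.Chars.join ['\n'] (q :: t) := by simp
          rw [hccat]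
          have hpos' : 0 ≤ PySem.Chars.find (PySem.Chars.join ['\n'] (q :: t)) M := by
            rw [hj']; exact Int.natCast_nonneg j'
          obtain ⟨hpre', hmin'⟩ := PySem.Chars.find_spec hpos'
          rw [hj', Int.toNat_natCast] at hpre' hmin'
          refine ⟨p.length + 1 + j', ?_, ?_⟩
          · apply find_eq_of
            · have hd : (p ++ '\n' :: PySem.Chars.join ['\n'] (q :: t)).drop (p.length + 1 + j')
                  = (PySem.Chars.join ['\n'] (q :: t)).drop j' := by
                rw [List.drop_append, List.drop_eq_nil_of_le (by omega), List.nil_append,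
                  show p.length + 1 + j' - p.length = j' + 1 from by omega, List.drop_succ_cons]
              rw [hd]
              exact hpre'
            · intro i' hi' hcon
              by_cases hip : i' ≤ p.length
              · rw [List.drop_append_of_le_length hip] at hcon
                exact hp ((PySem.Chars.exists_prefix_drop_iff_isIn M p).mp ⟨i', pv_nospan hMn hcon⟩)
              · obtain ⟨m, hm⟩ : ∃ m, i' - p.length = m + 1 := ⟨i' - p.length - 1, by omega⟩
                have hd : (p ++ '\n' :: PySem.Chars.join ['\n'] (q :: t)).drop i'
                    = (PySem.Chars.join ['\n'] (q :: t)).drop m := by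
                  rw [List.drop_append, List.drop_eq_nil_of_le (by omega), List.nil_append, hm,
                    List.drop_succ_cons]
                rw [hd] at hcon
                exact hmin' _ (by omega) hcon
          · have ht : (p ++ '\n' :: PySem.Chars.join ['\n'] (q :: t)).take (p.length + 1 + j')
                = p ++ '\n' :: (PySem.Chars.join ['\n'] (q :: t)).take j' := by
              rw [List.take_append, List.take_of_length_le (by omega),
                show p.length + 1 + j' - p.length = j' + 1 from by omega, List.take_succ_cons]
            rw [ht, List.count_append, List.count_cons]
            have hzero : p.count '\n' = 0 := List.count_eq_zero.mpr hpn
            simp [hzero, hcnt]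

theorem pvScanA_eq (lines : List String) : ∀ (k : Int),
    pvScanA lines k
      = match lines.findIdx? (fun l => PySem.Str.isIn "PROCEDURE DIVISION" (PySem.Str.upper l)) with
        | none => -1
        | some i => k + (i : Int) := by
  induction lines with
  | nil => intro k; simp [pvScanA]
  | cons l ls ih =>
    intro k
    rw [pvScanA]
    by_cases h : PySem.Str.isIn "PROCEDURE DIVISION" (PySem.Str.upper l) = true
    · simp only [List.findIdx?_cons, h, if_true]
      norm_num
    · simp only [List.findIdx?_cons, h, if_false, Bool.false_eq_true]
      rw [ih (k + 1)]
      cases hfi : ls.findIdx? (fun l => PySem.Str.isIn "PROCEDURE DIVISION" (PySem.Str.upper l)) with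
      | none => simp
      | some i =>
        simp only [Option.map_some]
        push_cast
        ring

-- ===== VERDICT (by name: the statement is the Claim_ definition above) =====
theorem extract_procedure_division_spec : Claim_equal_extract_procedure_division := by
  unfold Claim_equal_extract_procedure_division
  intro content _
  unfold Spec_extract_procedure_division extract_procedure_division extract_procedure_division_alt
  show (if pvScanA ((PySem.Str.split? content "\n").getD []) 0 = -1 then (([] : List String), (0 : Int))
        else (PySem.List.slice ((PySem.Str.split? content "\n").getD [])
                (some (pvScanA ((PySem.Str.split? content "\n").getD []) 0)) none,
              pvScanA ((PySem.Str.split? content "\n").getD []) 0))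
      = (if PySem.Str.find (PySem.Str.upper content) "PROCEDURE DIVISION" = -1
         then (([] : List String), (0 : Int))
         else (PySem.List.slice ((PySem.Str.split? content "\n").getD [])
                 (some ((PySem.Str.count (PySem.Str.slice content none
                   (some (PySem.Str.find (PySem.Str.upper content) "PROCEDURE DIVISION"))) "\n" : Int))) none,
               (PySem.Str.count (PySem.Str.slice content none
                 (some (PySem.Str.find (PySem.Str.upper content) "PROCEDURE DIVISION"))) "\n" : Int)))
  have hnl : ("\n" : String).toList = ['\n'] := rfl
  obtain ⟨L, hL, hLmap⟩ : ∃ L, PySem.Str.split? content "\n" = some L ∧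
      L.map String.toList = pvSplit content.toList := by
    have h := PySem.Str.split?_map content "\n"
    rw [hnl, PySem.Chars.split?] at h
    simp only [List.isEmpty_cons, Bool.false_eq_true, if_false] at h
    cases hs : PySem.Str.split? content "\n" with
    | none => rw [hs] at h; simp at h
    | some L =>
      rw [hs] at h
      simp only [Option.map_some, Option.some.injEq] at h
      exact ⟨L, rfl, by rw [h, splitOn_eq_pvSplit]⟩
  rw [hL]
  simp only [Option.getD_some]
  have hMne : ("PROCEDURE DIVISION".toList : List Char) ≠ [] := by decide
  have hMnl : '\n' ∉ ("PROCEDURE DIVISION".toList : List Char) := by decide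
  have hpsnl : ∀ p ∈ (pvSplit content.toList).map (List.map PySem.Chars.upperChar), '\n' ∉ p := by
    intro p hp
    obtain ⟨q, hq, rfl⟩ := List.mem_map.mp hp
    intro hmem
    obtain ⟨c, hc, hce⟩ := List.mem_map.mp hmem
    exact pvSplit_no_nl content.toList q hq (by rwa [(upperChar_nl_iff c).mp hce] at hc)
  have hJ : PySem.Chars.join ['\n'] ((pvSplit content.toList).map (List.map PySem.Chars.upperChar))
      = content.toList.map PySem.Chars.upperChar := by
    rw [← map_upper_join, pvSplit_join]
  have hfind : PySem.Str.find (PySem.Str.upper content) "PROCEDURE DIVISION"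
      = PySem.Chars.find
          (PySem.Chars.join ['\n'] ((pvSplit content.toList).map (List.map PySem.Chars.upperChar)))
          "PROCEDURE DIVISION".toList := by
    rw [PySem.Str.find_eq, PySem.Str.toList_upper, hJ]
    rfl
  have hidx : L.findIdx? (fun l => PySem.Str.isIn "PROCEDURE DIVISION" (PySem.Str.upper l))
      = ((pvSplit content.toList).map (List.map PySem.Chars.upperChar)).findIdx?
          (fun p => PySem.Chars.isIn "PROCEDURE DIVISION".toList p) := by
    rw [← hLmap, List.map_map, List.findIdx?_map]
    congr 1
    funext l
    simp [PySem.Str.isIn_eq, PySem.Str.toList_upper, PySem.Chars.upper, Function.comp]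
  have hmain := pv_main "PROCEDURE DIVISION".toList hMne hMnl
    ((pvSplit content.toList).map (List.map PySem.Chars.upperChar)) hpsnl
  cases hfi : ((pvSplit content.toList).map (List.map PySem.Chars.upperChar)).findIdx?
      (fun p => PySem.Chars.isIn "PROCEDURE DIVISION".toList p) with
  | none =>
    rw [hfi] at hmain
    rw [pvScanA_eq, hidx, hfi, hfind, hmain]
    simp
  | some i =>
    rw [hfi] at hmain
    obtain ⟨j, hjf, hcount⟩ := hmain
    rw [pvScanA_eq, hidx, hfi, hfind, hjf]
    show (if (0 : Int) + (i : Int) = -1 then (([] : List String), (0 : Int))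
          else (PySem.List.slice L (some ((0 : Int) + (i : Int))) none, (0 : Int) + (i : Int)))
        = (if ((j : Nat) : Int) = -1 then (([] : List String), (0 : Int))
           else (PySem.List.slice L
                   (some ((PySem.Str.count (PySem.Str.slice content none (some ((j : Nat) : Int))) "\n" : Int))) none,
                 (PySem.Str.count (PySem.Str.slice content none (some ((j : Nat) : Int))) "\n" : Int)))
    have hAne : (0 : Int) + (i : Int) ≠ -1 := by
      have := Int.natCast_nonneg i; omega
    have hBne : ((j : Nat) : Int) ≠ -1 := by
      have := Int.natCast_nonneg j; omega
    rw [if_neg hAne, if_neg hBne]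
    have hstart : (PySem.Str.count (PySem.Str.slice content none (some ((j : Nat) : Int))) "\n" : Int)
        = ((i : Nat) : Int) := by
      rw [PySem.Str.count_eq, hnl, PySem.Str.toList_slice, PySem.Chars.slice_eq_listSlice,
        PySem.List.slice_to _ (Int.natCast_nonneg j), Int.toNat_natCast, chars_count_nl]
      rw [hJ, ← List.map_take] at hcount
      rw [← count_nl_map_upper, hcount]
    rw [hstart, zero_add]
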